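-- pv_equiv track=rewrite | github.com/ChintanVachhani/codebreaker-mi | codebreaker_cv.py | __groupAndSortGridPoints
-- ===== SOURCE A (Python) =====
-- def __groupAndSortGridPoints(points, radius=5, method=0):
--     """
--     :param points: a list of points to be grouped and sorted
--     :param radius: difference between points to group
--     :param method: group and sort row wise (0) or column wise(1).
--     :return: a 2D list of points with grouped and sorted points based on radius and method.
--     """
--     t = 1
--     f = 0
--     if method == 1:
--         t = 0
--         f = 1
--     else:
--         t = 1
--         f = 0
--     allPoints = set()
--     for i in range(len(points)):
--         group = list()
--         for j in range(len(points)):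
--             difference = abs(points[i][t] - points[j][t])
--             if difference <= radius:
--                 group.append(points[j])
--         allPoints.add(tuple(sorted(group, key=lambda x: x[f])))
--     return sorted([list(x) for x in allPoints], key=lambda x: x[0][t])
-- ===== SOURCE B (Python) =====
-- def __groupAndSortGridPoints(points, radius=5, method=0):
--     t, f = (0, 1) if method == 1 else (1, 0)
--     sp = sorted(points, key=lambda p: p[f])  # presort by f once; windows stay sorted
--     seen = {}
--     for p in points:
--         c = p[t]
--         grp = [q for q in sp if abs(q[t] - c) <= radius]
--         seen.setdefault(tuple(grp), grp)
--     return sorted(seen.values(), key=lambda g: g[0][t])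
-- ===== Notes on version B (the rewrite author's own statement) =====
-- stated objective: alternative
-- what changed: B sorts the points by the f-coordinate once and obtains each group's sorted form by filtering that presorted list, deduplicating the groups in first-occurrence order via a dict keyed by the group itself, instead of A's per-point re-sort of every group collected in a set.
-- outside the precondition, e.g. on __groupAndSortGridPoints([(0, 0)], -1, 0): A raises IndexError, B raises IndexError
import Mathlib
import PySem

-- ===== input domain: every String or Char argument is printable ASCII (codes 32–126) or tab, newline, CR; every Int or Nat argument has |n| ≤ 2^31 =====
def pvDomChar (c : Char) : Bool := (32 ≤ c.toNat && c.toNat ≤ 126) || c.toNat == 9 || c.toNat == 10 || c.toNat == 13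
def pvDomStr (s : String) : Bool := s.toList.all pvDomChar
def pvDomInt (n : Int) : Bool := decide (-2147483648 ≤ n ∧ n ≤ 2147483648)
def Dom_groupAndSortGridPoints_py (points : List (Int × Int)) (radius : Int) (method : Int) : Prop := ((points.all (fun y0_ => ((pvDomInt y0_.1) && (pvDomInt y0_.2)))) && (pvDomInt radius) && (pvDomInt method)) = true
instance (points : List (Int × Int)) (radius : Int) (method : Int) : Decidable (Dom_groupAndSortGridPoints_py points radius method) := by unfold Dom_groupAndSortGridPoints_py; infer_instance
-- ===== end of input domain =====

-- B presorts the points by the f-coordinate ONCE and builds each group by filtering that sorted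
-- list, deduplicating the groups in first-occurrence order through a dict keyed by the group
-- itself, instead of A's per-point re-sort of every group collected in a set; return value only.

-- p[k] for a pair, k ∈ {0, 1} (the only indices the programs use)
def pvProj (p : Int × Int) (k : Int) : Int := if k == 0 then p.1 else p.2

-- ===== PORT A =====
def groupAndSortGridPoints_py (points : List (Int × Int)) (radius : Int) (method : Int) : List (List (Int × Int)) :=
  let t : Int := if method == 1 then 0 else 1
  let f : Int := if method == 1 then 1 else 0
  let allPoints : PySem.Set (List (Int × Int)) :=
    (PySem.List.pyRange 0 (PySem.List.len points)).foldl (fun s i =>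
      let group : List (Int × Int) :=
        (PySem.List.pyRange 0 (PySem.List.len points)).foldl (fun g j =>
          -- points[i] / points[j]: i, j ∈ range(len(points)), always in range, so the default is never read
          let difference : Int := |pvProj (PySem.List.pyGetD points i (0, 0)) t - pvProj (PySem.List.pyGetD points j (0, 0)) t|
          if difference ≤ radius then g ++ [PySem.List.pyGetD points j (0, 0)] else g) []
      s.add (PySem.List.sorted group (fun x => pvProj x f))) PySem.Set.empty
  -- x[0][t]: Python raises IndexError on an empty group (radius < 0); excluded by Pre_, default never read there
  PySem.List.sorted (allPoints.map (fun x => x)) (fun x => pvProj (x.headD (0, 0)) t)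

-- ===== PORT B =====
def groupAndSortGridPoints_py_alt (points : List (Int × Int)) (radius : Int) (method : Int) : List (List (Int × Int)) :=
  let t : Int := if method == 1 then 0 else 1
  let f : Int := if method == 1 then 1 else 0
  let sp : List (Int × Int) := PySem.List.sorted points (fun p => pvProj p f)
  let seen : PySem.Dict (List (Int × Int)) (List (Int × Int)) :=
    points.foldl (fun d p =>
      let c : Int := pvProj p t
      let grp : List (Int × Int) := sp.filter (fun q => decide (|pvProj q t - c| ≤ radius))
      d.setdefault grp grp) PySem.Dict.empty
  -- g[0][t]: Python raises IndexError on an empty group (radius < 0); excluded by Pre_, default never read there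
  PySem.List.sorted seen.values (fun g => pvProj (g.headD (0, 0)) t)

-- ===== PRECONDITION & SPEC =====
-- the group Python A builds for point p (in original order), its stored, f-sorted form, and its sort key
def pvGroup (points : List (Int × Int)) (radius t : Int) (p : Int × Int) : List (Int × Int) :=
  points.filter (fun q => decide (|pvProj q t - pvProj p t| ≤ radius))
def pvSG (points : List (Int × Int)) (radius t f : Int) (p : Int × Int) : List (Int × Int) :=
  PySem.List.sorted (pvGroup points radius t p) (fun x => pvProj x f)
def pvKey (points : List (Int × Int)) (radius t f : Int) (p : Int × Int) : Int :=
  pvProj ((pvSG points radius t f p).headD (0, 0)) t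

-- Pre_ excludes (a) radius < 0 with points nonempty, where Python A (and B) raises IndexError on
-- an empty group, and (b) inputs where two DISTINCT groups share the same sort key: there both
-- programs return the SAME groups, but their relative order among the tied groups is a tie of the
-- final stable sort, resolved by CPython's set-iteration order in A and by first occurrence in B.
def Pre_groupAndSortGridPoints_py (points : List (Int × Int)) (radius : Int) (method : Int) : Prop :=
  (points = [] ∨ 0 ≤ radius) ∧
  (∀ p ∈ points, ∀ q ∈ points,
    pvGroup points radius (if method == 1 then 0 else 1) p ≠ pvGroup points radius (if method == 1 then 0 else 1) q →
    pvKey points radius (if method == 1 then 0 else 1) (if method == 1 then 1 else 0) p ≠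
    pvKey points radius (if method == 1 then 0 else 1) (if method == 1 then 1 else 0) q)
instance (points : List (Int × Int)) (radius : Int) (method : Int) : Decidable (Pre_groupAndSortGridPoints_py points radius method) := by unfold Pre_groupAndSortGridPoints_py; infer_instance

def pvWitness_groupAndSortGridPoints_py : (List (Int × Int)) × Int × Int := ([(0, 0), (1, 3)], 5, 0)

def Spec_groupAndSortGridPoints_py (points : List (Int × Int)) (radius : Int) (method : Int) (out : List (List (Int × Int))) : Prop := out = groupAndSortGridPoints_py_alt points radius method
instance (points : List (Int × Int)) (radius : Int) (method : Int) (out : List (List (Int × Int))) : Decidable (Spec_groupAndSortGridPoints_py points radius method out) := by unfold Spec_groupAndSortGridPoints_py; infer_instance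

-- ===== CLAIM (what is proved, stated in full; the proofs are below) =====
def Claim_equal_groupAndSortGridPoints_py : Prop := ∀ (points : List (Int × Int)) (radius : Int) (method : Int), Dom_groupAndSortGridPoints_py points radius method → Pre_groupAndSortGridPoints_py points radius method → Spec_groupAndSortGridPoints_py points radius method (groupAndSortGridPoints_py points radius method)

-- ===== LEMMAS AND PROOFS =====

-- unfolding equations for PySem.List.insertBy on a cons
theorem pv_insertBy_cons_pos {α : Type} (before : α → α → Bool) (x y : α) (ys : List α)
    (h : before x y = true) : PySem.List.insertBy before x (y :: ys) = x :: y :: ys := by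
  simp [PySem.List.insertBy, h]

theorem pv_insertBy_cons_neg {α : Type} (before : α → α → Bool) (x y : α) (ys : List α)
    (h : before x y = false) : PySem.List.insertBy before x (y :: ys) = y :: PySem.List.insertBy before x ys := by
  simp [PySem.List.insertBy, h]

-- insertion in front when x sorts strictly before everything
theorem pv_insertBy_head {α : Type} (before : α → α → Bool) (x : α) (zs : List α)
    (h : ∀ z ∈ zs, before x z = true) : PySem.List.insertBy before x zs = x :: zs := by
  cases zs with
  | nil => rfl
  | cons z zs => exact pv_insertBy_cons_pos before x z zs (h z (by simp))

-- insertBy keeps the accumulator key-sorted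
theorem pv_pairwise_insertBy {α : Type} (key : α → Int) (x : α) (ys : List α)
    (h : ys.Pairwise (fun a b => key a ≤ key b)) :
    (PySem.List.insertBy (fun a b => decide (key a < key b)) x ys).Pairwise (fun a b => key a ≤ key b) := by
  induction ys with
  | nil => simp [PySem.List.insertBy]
  | cons y ys ih =>
    rw [List.pairwise_cons] at h
    by_cases hxy : key x < key y
    · rw [pv_insertBy_cons_pos _ _ _ _ (by simpa using hxy)]
      refine List.pairwise_cons.mpr ⟨?_, List.pairwise_cons.mpr h⟩
      intro z hz
      rcases List.mem_cons.mp hz with rfl | hz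
      · omega
      · exact le_trans (le_of_lt hxy) (h.1 z hz)
    · rw [pv_insertBy_cons_neg _ _ _ _ (by simpa using hxy)]
      refine List.pairwise_cons.mpr ⟨?_, ih h.2⟩
      intro z hz
      rcases (PySem.List.mem_insertBy _ _ _ _).mp hz with rfl | hz
      · omega
      · exact h.1 z hz

-- filtering commutes with insertion into a key-sorted list
theorem pv_filter_insertBy {α : Type} (key : α → Int) (P : α → Bool) (x : α) (ys : List α)
    (h : ys.Pairwise (fun a b => key a ≤ key b)) :
    (PySem.List.insertBy (fun a b => decide (key a < key b)) x ys).filter P =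
      if P x then PySem.List.insertBy (fun a b => decide (key a < key b)) x (ys.filter P)
      else ys.filter P := by
  induction ys with
  | nil => cases hP : P x <;> simp [PySem.List.insertBy, hP]
  | cons y ys ih =>
    rw [List.pairwise_cons] at h
    by_cases hxy : key x < key y
    · rw [pv_insertBy_cons_pos _ _ _ _ (by simpa using hxy)]
      cases hP : P x <;> cases hPy : P y <;>
        simp only [List.filter_cons, hP, hPy, Bool.false_eq_true, if_true, if_false]
      · -- P x true, P y false: x goes in front of filter ys, all of which sort after y
        rw [pv_insertBy_head]
        intro z hz
        have := h.1 z (List.mem_of_mem_filter hz)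
        simpa using lt_of_lt_of_le hxy this
      · rw [pv_insertBy_cons_pos _ _ _ _ (by simpa using hxy)]
    · rw [pv_insertBy_cons_neg _ _ _ _ (by simpa using hxy)]
      cases hP : P x <;> cases hPy : P y <;>
        simp only [List.filter_cons, hPy, Bool.false_eq_true, if_true, if_false] <;>
        rw [ih h.2] <;> simp only [hP, Bool.false_eq_true, if_true, if_false]
      rw [pv_insertBy_cons_neg _ _ _ _ (by simpa using hxy)]

-- a stable sort commutes with filtering
theorem pv_filter_sorted {α : Type} (key : α → Int) (P : α → Bool) (xs : List α) :
    (PySem.List.sorted xs key).filter P = PySem.List.sorted (xs.filter P) key := by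
  rw [PySem.List.sorted_eq_foldl_insertBy, PySem.List.sorted_eq_foldl_insertBy]
  suffices h : ∀ acc : List α, acc.Pairwise (fun a b => key a ≤ key b) →
      (xs.foldl (fun acc x => PySem.List.insertBy (fun a b => decide (key a < key b)) x acc) acc).filter P =
      (xs.filter P).foldl (fun acc x => PySem.List.insertBy (fun a b => decide (key a < key b)) x acc) (acc.filter P) by
    simpa using h [] (by simp)
  induction xs with
  | nil => intro acc _; simp
  | cons x xs ih =>
    intro acc hacc
    simp only [List.foldl_cons, List.filter_cons]
    rw [ih _ (pv_pairwise_insertBy key x acc hacc), pv_filter_insertBy key P x acc hacc]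
    cases hP : P x <;> simp

-- items of a single insert at a fresh key
theorem pv_items_insert_fresh {κ β : Type} [BEq κ] [LawfulBEq κ] (d : PySem.Dict κ β) (k : κ) (v : β)
    (h : d.contains k = false) : (d.insert k v).items = d.items ++ [(k, v)] := by
  simpa using PySem.Dict.items_foldl_insert_fresh [()] (fun _ => k) (fun _ => v) d (by simpa using h) (by simp)

-- the setdefault loop of B, keyed by the group itself, builds exactly A's first-occurrence set
theorem pv_foldl_setdefault_self {β : Type} [BEq β] [LawfulBEq β] (l : List β) :
    ∀ (s : PySem.Set β) (d : PySem.Dict β β), d.items = s.map (fun x => (x, x)) →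
    (l.foldl (fun d x => d.setdefault x x) d).items =
      (List.foldl PySem.Set.add s l).map (fun x => (x, x)) := by
  induction l with
  | nil => intro s d hd; simpa using hd
  | cons x l ih =>
    intro s d hd
    simp only [List.foldl_cons]
    by_cases hc : d.contains x = true
    · rw [PySem.Dict.setdefault_of_contains d x hc]
      have hmem : x ∈ s := by
        have : d.items.any (fun kv => kv.1 == x) = true := hc
        rw [hd, List.any_map, List.any_eq_true] at this
        obtain ⟨y, hy, hky⟩ := this
        have : y = x := by simpa using hky
        rwa [← this]
      have hadd : PySem.Set.add s x = s := by simp [PySem.Set.add, hmem]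
      rw [hadd]; exact ih s d hd
    · rw [PySem.Dict.setdefault_of_not_contains d x (by simpa using hc)]
      have hnotmem : x ∉ s := by
        intro hmem
        apply hc
        have : (x, x) ∈ d.items := by rw [hd]; exact List.mem_map.mpr ⟨x, hmem, rfl⟩
        exact List.any_eq_true.mpr ⟨_, this, by simp⟩
      have hadd : PySem.Set.add s x = s ++ [x] := by simp [PySem.Set.add, hnotmem]
      rw [hadd]
      refine ih (s ++ [x]) _ ?_
      rw [pv_items_insert_fresh d _ _ (by simpa using hc), hd]
      simp

-- Port A in normal form: the f-sorted groups, deduplicated in first-occurrence order, sorted by key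
theorem pv_A_norm (points : List (Int × Int)) (radius method : Int) :
    groupAndSortGridPoints_py points radius method =
      PySem.List.sorted
        (PySem.Set.ofList (points.map (pvSG points radius (if method == 1 then 0 else 1) (if method == 1 then 1 else 0))))
        (fun x => pvProj (x.headD (0, 0)) (if method == 1 then 0 else 1)) := by
  simp only [groupAndSortGridPoints_py]
  have hin : ∀ pi : Int × Int,
      (PySem.List.pyRange 0 (PySem.List.len points)).foldl
        (fun (g : List (Int × Int)) j =>
          if |pvProj pi (if method == 1 then 0 else 1) - pvProj (PySem.List.pyGetD points j (0, 0)) (if method == 1 then 0 else 1)| ≤ radius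
          then g ++ [PySem.List.pyGetD points j (0, 0)] else g) []
      = pvGroup points radius (if method == 1 then 0 else 1) pi := by
    intro pi
    have h1 := PySem.List.foldl_pyRange_pyGetD points ((0, 0) : Int × Int)
      (fun (g : List (Int × Int)) q =>
        if |pvProj pi (if method == 1 then 0 else 1) - pvProj q (if method == 1 then 0 else 1)| ≤ radius
        then g ++ [q] else g) [] (le_refl 0)
    refine h1.trans ?_
    rw [show (fun (g : List (Int × Int)) q =>
        if |pvProj pi (if method == 1 then 0 else 1) - pvProj q (if method == 1 then 0 else 1)| ≤ radius
        then g ++ [q] else g)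
      = (fun (g : List (Int × Int)) q =>
        if (fun q => decide (|pvProj q (if method == 1 then 0 else 1) - pvProj pi (if method == 1 then 0 else 1)| ≤ radius)) q = true
        then g ++ [(fun (q : Int × Int) => q) q] else g) from by
        funext g q; rw [abs_sub_comm]; simp]
    rw [PySem.List.foldl_append_if]
    simp [pvGroup]
  simp only [hin]
  have hout : points.foldl
      (fun (s : PySem.Set (List (Int × Int))) pi =>
        s.add (PySem.List.sorted (pvGroup points radius (if method == 1 then 0 else 1) pi)
          (fun x => pvProj x (if method == 1 then 1 else 0)))) PySem.Set.empty
      = PySem.Set.ofList (points.map (pvSG points radius (if method == 1 then 0 else 1) (if method == 1 then 1 else 0))) := by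
    rw [PySem.Set.ofList_eq_foldl, List.foldl_map]
    rfl
  have h2 := PySem.List.foldl_pyRange_pyGetD points ((0, 0) : Int × Int)
    (fun (s : PySem.Set (List (Int × Int))) pi =>
      s.add (PySem.List.sorted (pvGroup points radius (if method == 1 then 0 else 1) pi)
        (fun x => pvProj x (if method == 1 then 1 else 0)))) PySem.Set.empty (le_refl 0)
  simp only [Int.toNat_zero, List.drop_zero] at h2
  rw [h2.trans hout]
  simp

-- Port B in normal form: the same first-occurrence group set, sorted by the same key
theorem pv_B_norm (points : List (Int × Int)) (radius method : Int) :
    groupAndSortGridPoints_py_alt points radius method =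
      PySem.List.sorted
        (PySem.Set.ofList (points.map (pvSG points radius (if method == 1 then 0 else 1) (if method == 1 then 1 else 0))))
        (fun x => pvProj (x.headD (0, 0)) (if method == 1 then 0 else 1)) := by
  simp only [groupAndSortGridPoints_py_alt]
  have hgrp : ∀ p : Int × Int,
      (PySem.List.sorted points (fun p => pvProj p (if method == 1 then 1 else 0))).filter
        (fun q => decide (|pvProj q (if method == 1 then 0 else 1) - pvProj p (if method == 1 then 0 else 1)| ≤ radius))
      = pvSG points radius (if method == 1 then 0 else 1) (if method == 1 then 1 else 0) p := by
    intro p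
    rw [pv_filter_sorted]
    rfl
  simp only [hgrp]
  have hitems := pv_foldl_setdefault_self
    (points.map (pvSG points radius (if method == 1 then 0 else 1) (if method == 1 then 1 else 0)))
    [] PySem.Dict.empty rfl
  rw [List.foldl_map] at hitems
  have hvals : (points.foldl (fun d p =>
      PySem.Dict.setdefault d (pvSG points radius (if method == 1 then 0 else 1) (if method == 1 then 1 else 0) p)
        (pvSG points radius (if method == 1 then 0 else 1) (if method == 1 then 1 else 0) p)) PySem.Dict.empty).values
      = PySem.Set.ofList (points.map (pvSG points radius (if method == 1 then 0 else 1) (if method == 1 then 1 else 0))) := by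
    simp only [PySem.Dict.values, hitems, ← PySem.Set.ofList_eq_foldl]
    simp [List.map_map, Function.comp_def]
  rw [hvals]

-- ===== VERDICT (by name: the statement is the Claim_ definition above) =====
theorem groupAndSortGridPoints_py_spec : Claim_equal_groupAndSortGridPoints_py := by
  intro points radius method _ _
  unfold Spec_groupAndSortGridPoints_py
  rw [pv_A_norm, pv_B_norm]
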